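-- pv_equiv track=rewrite | github.com/EitanF12/GeneticAlgorithm | maman12.py | initialize_grid
-- ===== SOURCE A (Python) =====
-- def initialize_grid(grid_size, initial_pattern):
--     grid = [[0 for _ in range(grid_size)] for _ in range(grid_size)]
--     start_x = (grid_size - len(initial_pattern[0])) // 2
--     start_y = (grid_size - len(initial_pattern)) // 2
--     for i, row in enumerate(initial_pattern):
--         for j, cell in enumerate(row):
--             grid[start_y + i][start_x + j] = cell
--     return grid
-- ===== SOURCE B (Python) =====
-- def _placed_row(grid_size, start_x, row):
--     lo = max(start_x, 0)
--     hi = min(start_x + len(row), grid_size)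
--     cells = row[lo - start_x : hi - start_x]
--     return [0] * lo + cells + [0] * (grid_size - lo - len(cells))
--
--
-- def initialize_grid(grid_size, initial_pattern):
--     start_x = (grid_size - len(initial_pattern[0])) // 2
--     start_y = (grid_size - len(initial_pattern)) // 2
--     height = len(initial_pattern)
--     grid = []
--     for y in range(grid_size):
--         if start_y <= y < start_y + height:
--             grid.append(_placed_row(grid_size, start_x, initial_pattern[y - start_y]))
--         else:
--             grid.append([0] * grid_size)
--     return grid
-- ===== Notes on version B (the rewrite author's own statement) =====
-- stated objective: simpler
-- what changed: B assembles each final row directly in one pass (clipped blit: prefix zeros ++ visible slice of the pattern row ++ suffix zeros, selected by the row index) instead of allocating a zero grid and overwriting its cells one by one through nested index assignments.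
-- outside the precondition, e.g. on initialize_grid(2, [[1, 2], [3], [4]]): A returns [[3, 0], [4, 2]], B returns [[3, 0], [4, 0]]; on initialize_grid(2, [[1, 2, 3], [4]]): A returns [[2, 3], [0, 4]], B returns [[2, 3], [0, 0]]
import Mathlib
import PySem

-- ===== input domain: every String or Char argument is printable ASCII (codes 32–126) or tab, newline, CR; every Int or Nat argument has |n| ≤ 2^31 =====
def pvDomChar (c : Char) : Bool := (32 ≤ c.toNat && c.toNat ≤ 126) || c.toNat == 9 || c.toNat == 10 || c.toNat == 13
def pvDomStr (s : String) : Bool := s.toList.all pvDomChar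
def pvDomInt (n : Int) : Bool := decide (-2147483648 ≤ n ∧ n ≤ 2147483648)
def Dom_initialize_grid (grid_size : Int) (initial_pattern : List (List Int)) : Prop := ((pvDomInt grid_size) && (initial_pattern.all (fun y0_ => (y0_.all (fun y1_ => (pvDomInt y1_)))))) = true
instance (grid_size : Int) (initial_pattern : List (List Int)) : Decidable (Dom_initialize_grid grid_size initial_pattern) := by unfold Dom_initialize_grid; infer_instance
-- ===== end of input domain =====

-- B assembles each final row directly in one pass (clipped blit: prefix zeros ++ visible
-- slice of the pattern row ++ suffix zeros) instead of zero-filling a grid and overwriting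
-- cells one by one through nested index assignments; same asymptotic cost, simpler
-- decomposition.

-- ===== PORT A =====
def initialize_grid (grid_size : Int) (initial_pattern : List (List Int)) : List (List Int) :=
  let grid := (PySem.List.pyRange 0 grid_size 1).map
    (fun _ => (PySem.List.pyRange 0 grid_size 1).map (fun _ => (0 : Int)))
  let start_x := PySem.Int.floordiv (grid_size - PySem.List.len ((PySem.List.pyGet? initial_pattern 0).getD [])) 2
  let start_y := PySem.Int.floordiv (grid_size - PySem.List.len initial_pattern) 2
  (PySem.List.enumerate initial_pattern 0).foldl (fun grid ir =>
    (PySem.List.enumerate ir.2 0).foldl (fun grid jc =>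
      -- grid[start_y + i][start_x + j] = cell  (none = IndexError in Python: outside Pre_)
      match PySem.List.pyGet? grid (start_y + ir.1) with
      | none => grid
      | some r => PySem.List.pySetD grid (start_y + ir.1) (PySem.List.pySetD r (start_x + jc.1) jc.2)) grid) grid

-- ===== PORT B =====
-- helper _placed_row of Source B: the final row, built by clipping the pattern row to the grid
def placed_row (grid_size : Int) (start_x : Int) (row : List Int) : List Int :=
  let lo := max start_x 0
  let hi := min (start_x + PySem.List.len row) grid_size
  let cells := PySem.List.slice row (some (lo - start_x)) (some (hi - start_x))
  List.replicate lo.toNat (0 : Int) ++ cells ++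
    List.replicate (grid_size - lo - PySem.List.len cells).toNat (0 : Int)

def initialize_grid_alt (grid_size : Int) (initial_pattern : List (List Int)) : List (List Int) :=
  let start_x := PySem.Int.floordiv (grid_size - PySem.List.len ((PySem.List.pyGet? initial_pattern 0).getD [])) 2
  let start_y := PySem.Int.floordiv (grid_size - PySem.List.len initial_pattern) 2
  let height := PySem.List.len initial_pattern
  (PySem.List.pyRange 0 grid_size 1).map (fun y =>
    if start_y ≤ y ∧ y < start_y + height then
      placed_row grid_size start_x ((PySem.List.pyGet? initial_pattern (y - start_y)).getD [])
    else List.replicate grid_size.toNat (0 : Int))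

-- ===== PRECONDITION & SPEC =====
-- Pre_ admits the inputs on which the pattern's writes stay inside the grid PLUS the two
-- wrap-by-one families on which A's wrapped writes are all overwritten and equal B's
-- clipped placement (first row wider by one with rectangular rows; pattern taller by one
-- with the wrapped first row covered by the last row).  It excludes (a) inputs where A
-- raises IndexError (empty pattern, or a write outside [-grid_size, grid_size-1]), and
-- (b) a narrowing on which A still returns: the remaining taller/wider patterns, where
-- A's layout (rows shifted by wraparound with leftovers of overwritten rows, or a short
-- row's first cell left at the grid's right edge) is an accident of negative-index
-- wraparound that B does not reproduce.
def Pre_initialize_grid (grid_size : Int) (initial_pattern : List (List Int)) : Prop :=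
  initial_pattern ≠ [] ∧
  (PySem.List.len initial_pattern ≤ grid_size ∨
    (PySem.List.len initial_pattern = grid_size + 1 ∧
      (initial_pattern.headI = [] ∨
        (initial_pattern.getLast?.getD [] ≠ [] ∧
         PySem.List.len initial_pattern.headI ≤ PySem.List.len (initial_pattern.getLast?.getD []))))) ∧
  (∀ row ∈ initial_pattern, row ≠ [] →
    (-grid_size ≤ PySem.Int.floordiv (grid_size - PySem.List.len initial_pattern.headI) 2 ∧
     PySem.Int.floordiv (grid_size - PySem.List.len initial_pattern.headI) 2 + PySem.List.len row ≤ grid_size)) ∧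
  (0 ≤ PySem.Int.floordiv (grid_size - PySem.List.len initial_pattern.headI) 2 ∨
    ∀ row ∈ initial_pattern, row = [] ∨ PySem.List.len row = PySem.List.len initial_pattern.headI)
instance (grid_size : Int) (initial_pattern : List (List Int)) : Decidable (Pre_initialize_grid grid_size initial_pattern) := by unfold Pre_initialize_grid; infer_instance
def pvWitness_initialize_grid : Int × List (List Int) := (3, [[1, 2], [3, 4]])

def Spec_initialize_grid (grid_size : Int) (initial_pattern : List (List Int)) (out : List (List Int)) : Prop := out = initialize_grid_alt grid_size initial_pattern
instance (grid_size : Int) (initial_pattern : List (List Int)) (out : List (List Int)) : Decidable (Spec_initialize_grid grid_size initial_pattern out) := by unfold Spec_initialize_grid; infer_instance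

-- ===== CLAIM =====
def Claim_equal_initialize_grid : Prop := ∀ (grid_size : Int) (initial_pattern : List (List Int)), Dom_initialize_grid grid_size initial_pattern → Pre_initialize_grid grid_size initial_pattern → Spec_initialize_grid grid_size initial_pattern (initialize_grid grid_size initial_pattern)

-- ===== LEMMAS AND PROOFS =====

lemma pv_take_set_succ {α : Type} (l : List α) (k : Nat) (c : α) (h : k < l.length) :
    (l.set k c).take (k + 1) = l.take k ++ [c] := by
  rw [List.take_set, List.take_add_one, List.getElem?_eq_getElem h]
  rw [List.set_append]
  simp [Nat.min_eq_left (Nat.le_of_lt h)]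

-- xs[-1] reads, and xs[-1] = v sets, the last element
lemma pv_get_neg_one {α : Type} (xs : List α) (hne : xs ≠ []) :
    PySem.List.pyGet? xs (-1) = xs[xs.length - 1]? := by
  have hlen : 1 ≤ xs.length := List.length_pos_iff.mpr hne
  simp only [PySem.List.pyGet?, PySem.List.pyIdx?]
  rw [if_neg (by omega), if_pos (by omega : -(xs.length : Int) ≤ -1)]
  simp

lemma pv_setD_neg_one {α : Type} (xs : List α) (v : α) (hne : xs ≠ []) :
    PySem.List.pySetD xs (-1) v = xs.set (xs.length - 1) v := by
  have hlen : 1 ≤ xs.length := List.length_pos_iff.mpr hne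
  simp only [PySem.List.pySetD, PySem.List.pySet?, PySem.List.pyIdx?]
  rw [if_neg (by omega), if_pos (by omega : -(xs.length : Int) ≤ -1)]
  simp

-- the inner loop, nonnegative column start: on a grid of length L where the Python row
-- index ia resolves to position a, it writes row into grid[a] at offset sx
lemma pv_inner_fold (sx : Int) (hsx : 0 ≤ sx) (ia : Int) (a L : Nat)
    (hget : ∀ (gr : List (List Int)), gr.length = L → PySem.List.pyGet? gr ia = gr[a]?)
    (hset : ∀ (gr : List (List Int)) (v : List Int), gr.length = L →
      PySem.List.pySetD gr ia v = gr.set a v) :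
    ∀ (row : List Int) (s : Nat) (grid : List (List Int)) (_hL : grid.length = L)
      (ha : a < grid.length),
    sx.toNat + s + row.length ≤ (grid[a]'ha).length →
    (PySem.List.enumerate row (s : Int)).foldl
      (fun gr jc =>
        match PySem.List.pyGet? gr ia with
        | none => gr
        | some r => PySem.List.pySetD gr ia (PySem.List.pySetD r (sx + jc.1) jc.2)) grid
    = grid.set a ((grid[a]'ha).take (sx.toNat + s) ++ row ++
        (grid[a]'ha).drop (sx.toNat + s + row.length)) := by
  intro row
  induction row with
  | nil =>
    intro s grid _hL ha hle
    simp [PySem.List.enumerate, List.take_append_drop, List.set_getElem_self]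
  | cons c row ih =>
    intro s grid hL ha hle
    have hget' : PySem.List.pyGet? grid ia = some (grid[a]'ha) := by
      rw [hget grid hL, List.getElem?_eq_getElem ha]
    have hk : (sx + (s : Int)).toNat = sx.toNat + s := by omega
    have hsetrow : PySem.List.pySetD (grid[a]'ha) (sx + (s : Int)) c
        = (grid[a]'ha).set (sx.toNat + s) c := by
      rw [PySem.List.pySetD_of_nonneg _ _ (by omega : (0:Int) ≤ sx + (s:Int)), hk]
    have hstep : PySem.List.pySetD grid ia ((grid[a]'ha).set (sx.toNat + s) c)
        = grid.set a ((grid[a]'ha).set (sx.toNat + s) c) :=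
      hset grid _ hL
    simp only [PySem.List.enumerate, List.foldl_cons, hget', hsetrow, hstep]
    have ha' : a < (grid.set a ((grid[a]'ha).set (sx.toNat + s) c)).length := by
      simpa using ha
    have hcast : ((s : Int) + 1) = ((s + 1 : Nat) : Int) := by push_cast; ring
    rw [hcast, ih (s + 1) _ (by simpa using hL) ha' (by simp at hle ⊢; omega)]
    have hgete : (grid.set a ((grid[a]'ha).set (sx.toNat + s) c))[a]'ha'
        = (grid[a]'ha).set (sx.toNat + s) c := by
      simp
    rw [List.set_set]
    rw [hgete]
    have hklt : sx.toNat + s < (grid[a]'ha).length := by simp at hle; omega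
    rw [show sx.toNat + (s + 1) = (sx.toNat + s) + 1 by ring,
        pv_take_set_succ _ _ _ hklt,
        List.drop_set]
    simp only [if_pos (by omega : sx.toNat + s < sx.toNat + s + 1 + row.length)]
    have : sx.toNat + s + (c :: row).length = sx.toNat + s + 1 + row.length := by
      simp; omega
    rw [this]
    simp [List.append_assoc]

-- folding from start index s+1 equals folding from s with the step shifted by one
lemma pv_enum_shift {σ β : Type} (f f' : σ → Int × β → σ)
    (hf : ∀ (st : σ) (k : Int) (c : β), f st (k + 1, c) = f' st (k, c)) :
    ∀ (l : List β) (s : Int) (init : σ),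
    (PySem.List.enumerate l (s + 1)).foldl f init = (PySem.List.enumerate l s).foldl f' init := by
  intro l
  induction l with
  | nil => intro s init; simp [PySem.List.enumerate]
  | cons c t ih =>
    intro s init
    simp only [PySem.List.enumerate, List.foldl_cons]
    rw [hf init s c, ih (s + 1)]

-- the inner loop at column start -1 on a base row of length g, pattern row of length g+1:
-- the wrapped first write lands at the end and is overwritten; result = row.drop 1
lemma pv_inner_neg (g : Int) (hg : 1 ≤ g) (ia : Int) (a L : Nat)
    (hget : ∀ (gr : List (List Int)), gr.length = L → PySem.List.pyGet? gr ia = gr[a]?)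
    (hset : ∀ (gr : List (List Int)) (v : List Int), gr.length = L →
      PySem.List.pySetD gr ia v = gr.set a v)
    (row : List Int) (hw : row.length = g.toNat + 1)
    (grid : List (List Int)) (hL : grid.length = L) (ha : a < grid.length)
    (hblen : (grid[a]'ha).length = g.toNat) :
    (PySem.List.enumerate row 0).foldl
      (fun gr jc =>
        match PySem.List.pyGet? gr ia with
        | none => gr
        | some r => PySem.List.pySetD gr ia (PySem.List.pySetD r (-1 + jc.1) jc.2)) grid
    = grid.set a (row.drop 1) := by
  cases row with
  | nil => simp at hw
  | cons c rest =>
    have hrest : rest.length = g.toNat := by simp at hw; omega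
    have hget' : PySem.List.pyGet? grid ia = some (grid[a]'ha) := by
      rw [hget grid hL, List.getElem?_eq_getElem ha]
    have hzne : grid[a]'ha ≠ [] := by
      intro h0; rw [h0] at hblen; simp at hblen; omega
    simp only [PySem.List.enumerate, List.foldl_cons, hget']
    rw [show (-1 : Int) + 0 = -1 by ring, pv_setD_neg_one _ _ hzne]
    set zrow' := (grid[a]'ha).set ((grid[a]'ha).length - 1) c with hzrow'
    have hsetg : PySem.List.pySetD grid ia zrow' = grid.set a zrow' := hset grid _ hL
    rw [hsetg]
    have hshift := pv_enum_shift
      (f := fun gr (jc : Int × Int) =>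
        match PySem.List.pyGet? gr ia with
        | none => gr
        | some r => PySem.List.pySetD gr ia (PySem.List.pySetD r (-1 + jc.1) jc.2))
      (f' := fun gr (jc : Int × Int) =>
        match PySem.List.pyGet? gr ia with
        | none => gr
        | some r => PySem.List.pySetD gr ia (PySem.List.pySetD r (0 + jc.1) jc.2))
      (by
        intro st k cc
        show (match PySem.List.pyGet? st ia with
          | none => st
          | some r => PySem.List.pySetD st ia (PySem.List.pySetD r (-1 + (k + 1)) cc)) =
          (match PySem.List.pyGet? st ia with
          | none => st
          | some r => PySem.List.pySetD st ia (PySem.List.pySetD r (0 + k) cc))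
        rw [show (-1 : Int) + (k + 1) = 0 + k from by ring])
      rest 0 (grid.set a zrow')
    rw [hshift]
    have ha' : a < (grid.set a zrow').length := by simpa using ha
    have h2 := pv_inner_fold 0 (by norm_num) ia a L hget hset rest 0 (grid.set a zrow')
      (by simpa using hL) ha'
      (by simp [hzrow', hblen, hrest])
    simp only [Nat.cast_zero, Nat.add_zero] at h2
    rw [h2, List.set_set]
    have hgete : (grid.set a zrow')[a]'ha' = zrow' := by simp
    have hzlen : zrow'.length = g.toNat := by simp [hzrow', hblen]
    rw [hgete]
    simp [hrest, hzlen, List.drop_of_length_le]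

-- the outer loop from pattern row s targeting grid row o, abstracted over the per-row
-- builder brow: each pattern row is blitted into a still-zero grid row, so the fold
-- replaces the band [o, o + rows.length) with rows.map brow
lemma pv_outer_gen (g sx sy : Int) (brow : List Int → List Int) :
    ∀ (rows : List (List Int)),
    (∀ row ∈ rows, ∀ (grid : List (List Int)) (ia : Int) (a : Nat), ia = (a : Int) →
      ∀ (ha : a < grid.length), grid[a]'ha = List.replicate g.toNat (0 : Int) →
      (PySem.List.enumerate row 0).foldl (fun gr jc =>
        match PySem.List.pyGet? gr ia with
        | none => gr
        | some r => PySem.List.pySetD gr ia (PySem.List.pySetD r (sx + jc.1) jc.2)) grid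
      = grid.set a (brow row)) →
    ∀ (s o : Nat) (grid : List (List Int)), sy + (s : Int) = (o : Int) →
    o + rows.length ≤ grid.length →
    (∀ t (_ht : t < rows.length) (h2 : o + t < grid.length),
        grid[o + t]'h2 = List.replicate g.toNat (0 : Int)) →
    (PySem.List.enumerate rows (s : Int)).foldl (fun gr ir =>
      (PySem.List.enumerate ir.2 0).foldl (fun gr2 jc =>
        match PySem.List.pyGet? gr2 (sy + ir.1) with
        | none => gr2
        | some r => PySem.List.pySetD gr2 (sy + ir.1) (PySem.List.pySetD r (sx + jc.1) jc.2)) gr) grid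
    = grid.take o ++ rows.map brow ++ grid.drop (o + rows.length) := by
  intro rows
  induction rows with
  | nil =>
    intro _ s o grid ho h1 h2
    simp [PySem.List.enumerate, List.take_append_drop]
  | cons row rows ih =>
    intro hstep s o grid ho h1 h2
    have ha : o < grid.length := by simp at h1; omega
    have hz : grid[o]'ha = List.replicate g.toNat 0 := by
      have := h2 0 (by simp) (by omega)
      simpa using this
    simp only [PySem.List.enumerate, List.foldl_cons]
    rw [hstep row (by simp) grid (sy + (s : Int)) o ho ha hz]
    set brw := brow row with hbrw
    have hcast : ((s : Int) + 1) = ((s + 1 : Nat) : Int) := by push_cast; ring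
    rw [hcast, ih (fun r hr => hstep r (by simp [hr])) (s + 1) (o + 1) (grid.set o brw)
      (by omega)
      (by simp; simp at h1; omega)
      (by
        intro t _ht hlt
        have hne : o ≠ o + 1 + t := by omega
        rw [List.getElem_set_ne hne]
        have := h2 (1 + t) (by simp; omega) (by simp at hlt; omega)
        convert this using 2
        omega)]
    rw [pv_take_set_succ grid o brw ha]
    rw [List.drop_set]
    rw [if_pos (by omega : o < o + 1 + rows.length)]
    rw [show o + (row :: rows).length = o + 1 + rows.length from by simp; omega]
    simp [List.append_assoc]
    rfl

-- the banded concatenation IS B's row map over range(grid_size), band inside the grid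
lemma pv_assemble_gen (g sy : Int) (hsy : 0 ≤ sy) (p : List (List Int))
    (hsyp : sy.toNat + p.length ≤ g.toNat) (brow : List Int → List Int) :
    List.replicate sy.toNat (List.replicate g.toNat (0 : Int)) ++ p.map brow ++
      List.replicate (g.toNat - (sy.toNat + p.length)) (List.replicate g.toNat (0 : Int))
    = (PySem.List.pyRange 0 g 1).map (fun y =>
        if sy ≤ y ∧ y < sy + (p.length : Int) then
          brow ((PySem.List.pyGet? p (y - sy)).getD [])
        else List.replicate g.toNat (0 : Int)) := by
  rw [PySem.List.pyRange_one, List.map_map]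
  apply List.ext_getElem
  · simp; omega
  · intro k h1 h2
    simp only [List.getElem_map, List.getElem_range, Function.comp_apply]
    have hk : k < g.toNat := by simpa using h2
    by_cases hlow : k < sy.toNat
    · rw [List.getElem_append_left (by simp; omega), List.getElem_append_left (by simp; omega)]
      rw [List.getElem_replicate, if_neg (by omega)]
    · by_cases hmid : k < sy.toNat + p.length
      · rw [List.getElem_append_left (by simp; omega),
          List.getElem_append_right (by simp; omega)]
        rw [List.getElem_map]
        have hcast : (0 : Int) + (k : Int) - sy = ((k - sy.toNat : Nat) : Int) := by omega
        rw [if_pos (by omega), hcast, PySem.List.pyGet?_natCast,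
          List.getElem?_eq_getElem (by omega : k - sy.toNat < p.length)]
        simp
      · rw [List.getElem_append_right (by simp; omega)]
        rw [List.getElem_replicate, if_neg (by omega)]

-- B's row map over range(grid_size) for the taller-by-one pattern: the band is the whole
-- grid and row y shows pattern row y+1
lemma pv_assemble_tall (g sy : Int) (hsy1 : sy = -1) (p0 : List Int)
    (tail : List (List Int)) (hlen : tail.length = g.toNat)
    (brow : List Int → List Int) :
    tail.map brow
    = (PySem.List.pyRange 0 g 1).map (fun y =>
        if sy ≤ y ∧ y < sy + (((p0 :: tail).length : Nat) : Int) then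
          brow ((PySem.List.pyGet? (p0 :: tail) (y - sy)).getD [])
        else List.replicate g.toNat (0 : Int)) := by
  subst hsy1
  rw [PySem.List.pyRange_one, List.map_map]
  apply List.ext_getElem
  · simp; omega
  · intro k h1 h2
    simp only [List.getElem_map, List.getElem_range, Function.comp_apply]
    have hk : k < g.toNat := by simpa using h2
    rw [if_pos (by constructor <;> [omega; (simp; omega)])]
    have hcast : (0 : Int) + (k : Int) - (-1) = ((k + 1 : Nat) : Int) := by omega
    rw [hcast, PySem.List.pyGet?_natCast,
      List.getElem?_eq_getElem (by simp; omega : k + 1 < (p0 :: tail).length)]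
    simp

-- a constant comprehension over range(g) is a replicate
lemma pv_map_const_pyRange {α : Type} (g : Int) (c : α) :
    (PySem.List.pyRange 0 g 1).map (fun _ => c) = List.replicate g.toNat c := by
  rw [PySem.List.pyRange_one]
  simp [List.map_map, Function.comp_def, List.map_const']

-- first element of a nonempty pattern
lemma pv_head_getD (p : List (List Int)) (hne : p ≠ []) :
    (PySem.List.pyGet? p 0).getD [] = p.headI := by
  cases p with
  | nil => exact absurd rfl hne
  | cons h t => rw [PySem.List.pyGet?_zero_cons]; rfl

-- B's row builder, pattern row inside the grid: plain padded concatenation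
lemma pv_row_fits (g sx : Int) (row : List Int) (hsx : 0 ≤ sx)
    (hle : sx + (row.length : Int) ≤ g) :
    placed_row g sx row = List.replicate sx.toNat (0 : Int) ++ row ++
      List.replicate (g.toNat - (sx.toNat + row.length)) (0 : Int) := by
  simp only [placed_row, PySem.List.len_eq]
  rw [show max sx 0 = sx by omega, show min (sx + (row.length : Int)) g = sx + (row.length : Int) by omega]
  rw [show sx - sx = (0 : Int) by ring, show sx + (row.length : Int) - sx = ((row.length : Nat) : Int) by ring]
  rw [PySem.List.slice_zero_start, PySem.List.slice_to_natCast, List.take_length]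
  congr 2
  omega

-- B's row builder on an empty pattern row: a zero row
lemma pv_row_empty (g sx : Int) (hlo : max sx 0 ≤ g) :
    placed_row g sx [] = List.replicate g.toNat (0 : Int) := by
  simp only [placed_row, PySem.List.len_eq, List.length_nil, Nat.cast_zero, add_zero]
  have hsl : PySem.List.slice ([] : List Int) (some (max sx 0 - sx)) (some (min sx g - sx)) = [] := by
    simp [PySem.List.slice]
  rw [hsl]
  simp only [List.length_nil, Nat.cast_zero, sub_zero, List.append_nil]
  rw [← List.replicate_add]
  congr 1
  omega

-- B's row builder at column start -1 on a row of length g+1: the clipped row = row[1:]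
lemma pv_row_neg (g : Int) (hg : 1 ≤ g) (row : List Int) (hw : row.length = g.toNat + 1) :
    placed_row g (-1) row = row.drop 1 := by
  simp only [placed_row, PySem.List.len_eq]
  rw [show max (-1 : Int) 0 = 0 by omega,
      show min ((-1 : Int) + (row.length : Int)) g = g by omega]
  rw [show (0 : Int) - (-1) = ((1 : Nat) : Int) by norm_num,
      show g - (-1 : Int) = ((g.toNat + 1 : Nat) : Int) by omega]
  rw [PySem.List.slice_natCast]
  rw [List.take_of_length_le (by simp [hw])]
  have hdl : (row.drop 1).length = g.toNat := by simp [hw]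
  simp
  omega

-- zero-row prefix/suffix of a padded row
lemma pv_take_pad (a : Nat) (p0 l2 : List Int) :
    ((List.replicate a (0:Int) ++ p0) ++ l2).take a = List.replicate a (0:Int) := by
  rw [List.append_assoc, List.take_append_of_le_length (by simp)]
  simp

lemma pv_drop_pad (a c k : Nat) (p0 : List Int) (hk : a + p0.length ≤ k) :
    (List.replicate a (0:Int) ++ p0 ++ List.replicate c (0:Int)).drop k
    = List.replicate (a + p0.length + c - k) (0:Int) := by
  rw [List.drop_append, List.drop_append]
  rw [List.drop_replicate, List.drop_of_length_le (by simp; omega), List.drop_replicate]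
  simp
  omega

-- per-row step on a zero grid row at a nonnegative resolved index: the inner loop writes
-- B's clipped row
lemma pv_hstep (g : Int) (hg : 0 ≤ g) (p : List (List Int)) (hne : p ≠ [])
    (sx : Int) (hsx : sx = (g - (p.headI.length : Int)) / 2)
    (hrows : ∀ row ∈ p, row ≠ [] → -g ≤ sx ∧ sx + (row.length : Int) ≤ g)
    (hrect : 0 ≤ sx ∨ ∀ row ∈ p, row = [] ∨ (row.length : Int) = (p.headI.length : Int)) :
    ∀ row ∈ p, ∀ (grid : List (List Int)) (ia : Int) (a : Nat), ia = (a : Int) →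
      ∀ (ha : a < grid.length), grid[a]'ha = List.replicate g.toNat (0 : Int) →
      (PySem.List.enumerate row 0).foldl (fun gr jc =>
        match PySem.List.pyGet? gr ia with
        | none => gr
        | some r => PySem.List.pySetD gr ia (PySem.List.pySetD r (sx + jc.1) jc.2)) grid
      = grid.set a (placed_row g sx row) := by
  intro row hrow grid ia a hia ha hz
  have hsxle : max sx 0 ≤ g := by omega
  have hget : ∀ (gr : List (List Int)), gr.length = grid.length →
      PySem.List.pyGet? gr ia = gr[a]? := by
    intro gr _; rw [hia]; exact PySem.List.pyGet?_natCast ..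
  have hset : ∀ (gr : List (List Int)) (v : List Int), gr.length = grid.length →
      PySem.List.pySetD gr ia v = gr.set a v := by
    intro gr v _; rw [hia]; exact PySem.List.pySetD_natCast ..
  by_cases hre : row = []
  · subst hre
    rw [pv_row_empty g sx hsxle]
    simp [PySem.List.enumerate, ← hz, List.set_getElem_self]
  · have hb := hrows row hrow hre
    by_cases hsx0 : 0 ≤ sx
    · have := pv_inner_fold sx hsx0 ia a grid.length hget hset row 0 grid rfl ha
        (by rw [hz]; simp; omega)
      simp only [Nat.cast_zero, Nat.add_zero] at this
      rw [this, hz, List.take_replicate, List.drop_replicate,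
        Nat.min_eq_left (by omega : sx.toNat ≤ g.toNat),
        pv_row_fits g sx row hsx0 (by omega)]
    · -- sx < 0: Pre_ forces sx = -1 and, by rectangularity, row.length = g + 1
      have hh : p.headI ∈ p := by
        cases p with
        | nil => exact absurd rfl hne
        | cons x t => exact List.mem_cons_self ..
      have hhne : p.headI ≠ [] := by
        intro h0
        rw [h0] at hsx
        simp at hsx
        omega
      have hh2 := hrows p.headI hh hhne
      have hsx1 : sx = -1 := by omega
      have hg1 : 1 ≤ g := by omega
      have hrect' : (row.length : Int) = (p.headI.length : Int) := by
        rcases hrect with h | h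
        · omega
        · rcases h row hrow with h0 | h0
          · exact absurd h0 hre
          · exact h0
      have hw : row.length = g.toNat + 1 := by omega
      rw [hsx1]
      rw [pv_inner_neg g hg1 ia a grid.length hget hset row hw grid rfl ha (by rw [hz]; simp),
        pv_row_neg g hg1 row hw]

-- ===== VERDICT (by name: the statement is the Claim_ definition above) =====
theorem initialize_grid_spec : Claim_equal_initialize_grid := by
  intro g p _hDom hPre
  obtain ⟨hne, hvert, hrows, hrect⟩ := hPre
  simp only [PySem.List.len_eq,
    PySem.Int.floordiv_eq_ediv_of_pos (by norm_num : (0:Int) < 2)] at hvert hrows hrect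
  have hp1 : 1 ≤ p.length := List.length_pos_iff.mpr hne
  have hg : 0 ≤ g := by rcases hvert with h | ⟨h, _⟩ <;> omega
  show initialize_grid g p = initialize_grid_alt g p
  simp only [initialize_grid, initialize_grid_alt, PySem.List.len_eq, pv_head_getD p hne]
  rw [PySem.Int.floordiv_eq_ediv_of_pos (by norm_num : (0:Int) < 2),
    PySem.Int.floordiv_eq_ediv_of_pos (by norm_num : (0:Int) < 2)]
  set sx := (g - (p.headI.length : Int)) / 2 with hsxdef
  set sy := (g - (p.length : Int)) / 2 with hsydef
  have hstep := pv_hstep g hg p hne sx hsxdef hrows hrect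
  rw [pv_map_const_pyRange g ((PySem.List.pyRange 0 g 1).map (fun _ => (0 : Int))),
    pv_map_const_pyRange g (0 : Int)]
  rcases hvert with hle | ⟨hh, hlast⟩
  · -- pattern fits vertically: the band lies inside the grid
    have hsy : 0 ≤ sy := by omega
    have hsyp : sy.toNat + p.length ≤ g.toNat := by omega
    have hout := pv_outer_gen g sx sy (placed_row g sx) p hstep 0 sy.toNat
      (List.replicate g.toNat (List.replicate g.toNat (0 : Int)))
      (by omega)
      (by simp; omega)
      (by intro t _ht h2; exact List.getElem_replicate ..)
    simp only [Nat.cast_zero] at hout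
    rw [hout, List.take_replicate, List.drop_replicate,
      Nat.min_eq_left (by omega : sy.toNat ≤ g.toNat)]
    exact pv_assemble_gen g sy hsy p hsyp (placed_row g sx)
  · -- pattern taller by one: the wrapped first row is covered by the last row
    have hsy1 : sy = -1 := by omega
    cases p with
    | nil => exact absurd rfl hne
    | cons p0 tail =>
      have htlen : tail.length = g.toNat := by simp at hp1 hh ⊢; omega
      by_cases htne : tail = []
      · -- grid_size = 0 and the single pattern row is empty: both sides are []
        subst htne
        have hg0 : g = 0 := by simp at htlen; omega
        have hp0e : p0 = [] := by
          by_contra hp0ne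
          have hlp0 : 1 ≤ p0.length := List.length_pos_iff.mpr hp0ne
          have := hrows p0 (List.mem_cons_self ..) hp0ne
          have hhead : ([p0] : List (List Int)).headI = p0 := rfl
          rw [hhead] at hsxdef
          omega
        subst hp0e
        rw [hg0]
        simp [PySem.List.enumerate]
      · -- split tail = mid ++ [last]
        have hg1 : 1 ≤ g := by
          have : 1 ≤ tail.length := List.length_pos_iff.mpr htne
          omega
        set mid := tail.dropLast with hmiddef
        set last := tail.getLast htne with hlastdef
        have htsplit : mid ++ [last] = tail := List.dropLast_append_getLast htne
        have hmidlen : mid.length = g.toNat - 1 := by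
          simp [hmiddef, htlen]
        have hplast : (p0 :: tail).getLast?.getD [] = last := by
          rw [show p0 :: tail = (p0 :: mid) ++ [last] from by simp [htsplit]]
          rw [List.getLast?_concat]
          rfl
        rw [hplast] at hlast
        simp only [List.headI] at hlast hrows hrect hsxdef
        have hmemlast : last ∈ p0 :: tail := by
          rw [← htsplit]
          exact List.mem_cons_of_mem _ (List.mem_append_right _ (List.mem_singleton_self _))
        have hmemmid : ∀ r ∈ mid, r ∈ p0 :: tail := by
          intro r hr
          rw [← htsplit]
          exact List.mem_cons_of_mem _ (List.mem_append_left _ hr)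
        -- A's fold: peel the first row, fold the middle band, then the last row
        have hA : (PySem.List.enumerate (p0 :: tail) 0).foldl (fun gr ir =>
            (PySem.List.enumerate ir.2 0).foldl (fun gr2 jc =>
              match PySem.List.pyGet? gr2 (sy + ir.1) with
              | none => gr2
              | some r => PySem.List.pySetD gr2 (sy + ir.1) (PySem.List.pySetD r (sx + jc.1) jc.2)) gr)
            (List.replicate g.toNat (List.replicate g.toNat (0 : Int)))
            = tail.map (placed_row g sx) := by
          have hgetneg : ∀ (gr : List (List Int)), gr.length = g.toNat →
              PySem.List.pyGet? gr (sy + 0) = gr[g.toNat - 1]? := by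
            intro gr hgr
            have hgrne : gr ≠ [] := by
              intro h0; rw [h0] at hgr; simp at hgr; omega
            rw [show sy + 0 = (-1 : Int) by omega, pv_get_neg_one gr hgrne, hgr]
          have hsetneg : ∀ (gr : List (List Int)) (v : List Int), gr.length = g.toNat →
              PySem.List.pySetD gr (sy + 0) v = gr.set (g.toNat - 1) v := by
            intro gr v hgr
            have hgrne : gr ≠ [] := by
              intro h0; rw [h0] at hgr; simp at hgr; omega
            rw [show sy + 0 = (-1 : Int) by omega, pv_setD_neg_one gr v hgrne, hgr]
          have hialast : sy + (0 + 1 + (mid.length : Int)) = ((g.toNat - 1 : Nat) : Int) := by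
            omega
          have hgetlast : ∀ (gr : List (List Int)), gr.length = g.toNat →
              PySem.List.pyGet? gr (sy + (0 + 1 + (mid.length : Int))) = gr[g.toNat - 1]? := by
            intro gr _; rw [hialast]; exact PySem.List.pyGet?_natCast ..
          have hsetlast : ∀ (gr : List (List Int)) (v : List Int), gr.length = g.toNat →
              PySem.List.pySetD gr (sy + (0 + 1 + (mid.length : Int))) v = gr.set (g.toNat - 1) v := by
            intro gr v _; rw [hialast]; exact PySem.List.pySetD_natCast ..
          have hkey : ∃ b : List Int,
              ((PySem.List.enumerate p0 0).foldl (fun gr2 jc =>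
                match PySem.List.pyGet? gr2 (sy + 0) with
                | none => gr2
                | some r => PySem.List.pySetD gr2 (sy + 0) (PySem.List.pySetD r (sx + jc.1) jc.2))
                (List.replicate g.toNat (List.replicate g.toNat (0 : Int)))
               = (List.replicate g.toNat (List.replicate g.toNat (0 : Int))).set (g.toNat - 1) b) ∧
              b.length = g.toNat ∧
              ∀ (grid2 : List (List Int)) (hlen2 : grid2.length = g.toNat)
                (ha2 : g.toNat - 1 < grid2.length),
                grid2[g.toNat - 1]'ha2 = b →
                (PySem.List.enumerate last 0).foldl (fun gr2 jc =>
                  match PySem.List.pyGet? gr2 (sy + (0 + 1 + (mid.length : Int))) with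
                  | none => gr2
                  | some r => PySem.List.pySetD gr2 (sy + (0 + 1 + (mid.length : Int)))
                      (PySem.List.pySetD r (sx + jc.1) jc.2)) grid2
                = grid2.set (g.toNat - 1) (placed_row g sx last) := by
            by_cases hp0 : p0 = []
            · refine ⟨List.replicate g.toNat (0 : Int), ?_, by simp, ?_⟩
              · subst hp0
                simp only [PySem.List.enumerate, List.foldl_nil]
                rw [List.set_replicate_self]
              · intro grid2 hlen2 ha2 hb2
                exact hstep last hmemlast grid2 _ (g.toNat - 1) hialast ha2 (by rw [hb2])
            · obtain ⟨hlne, hwle⟩ := hlast.resolve_left hp0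
              have hlp0 : 1 ≤ p0.length := List.length_pos_iff.mpr hp0
              have hbp0 := hrows p0 (List.mem_cons_self ..) hp0
              have hblast := hrows last hmemlast hlne
              by_cases hsx0 : 0 ≤ sx
              · refine ⟨List.replicate sx.toNat (0 : Int) ++ p0 ++
                  List.replicate (g.toNat - (sx.toNat + p0.length)) (0 : Int), ?_, by simp; omega, ?_⟩
                · have hfold := pv_inner_fold sx hsx0 (sy + 0) (g.toNat - 1) g.toNat
                    hgetneg hsetneg p0 0
                    (List.replicate g.toNat (List.replicate g.toNat (0 : Int)))
                    (by simp) (by simp; omega) (by simp; omega)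
                  simp only [Nat.cast_zero, Nat.add_zero] at hfold
                  rw [hfold]
                  congr 1
                  rw [List.getElem_replicate, List.take_replicate, List.drop_replicate,
                    Nat.min_eq_left (by omega : sx.toNat ≤ g.toNat)]
                · intro grid2 hlen2 ha2 hb2
                  have hfold := pv_inner_fold sx hsx0 (sy + (0 + 1 + (mid.length : Int)))
                    (g.toNat - 1) g.toNat hgetlast hsetlast last 0 grid2 hlen2 ha2
                    (by rw [hb2]; simp; omega)
                  simp only [Nat.cast_zero, Nat.add_zero] at hfold
                  rw [hfold]
                  congr 1
                  rw [hb2, pv_take_pad, pv_drop_pad _ _ _ _ (by simp; omega)]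
                  rw [show sx.toNat + p0.length + (g.toNat - (sx.toNat + p0.length))
                      - (sx.toNat + last.length) = g.toNat - (sx.toNat + last.length)
                    from by omega]
                  rw [pv_row_fits g sx last hsx0 (by omega)]
              · -- sx = -1: rows of width g+1, every write of the base is overwritten
                have hh2 := hrows p0 (List.mem_cons_self ..) hp0
                have hsx1 : sx = -1 := by omega
                have hw0 : p0.length = g.toNat + 1 := by omega
                have hwl : last.length = g.toNat + 1 := by
                  rcases hrect with h | h
                  · omega
                  · rcases h last hmemlast with h0 | h0
                    · exact absurd h0 hlne
                    · omega
                refine ⟨p0.drop 1, ?_, by simp [hw0], ?_⟩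
                · rw [hsx1]
                  exact pv_inner_neg g hg1 (sy + 0) (g.toNat - 1) g.toNat hgetneg hsetneg
                    p0 hw0 _ (by simp) (by simp; omega) (by simp)
                · intro grid2 hlen2 ha2 hb2
                  rw [hsx1]
                  rw [pv_inner_neg g hg1 (sy + (0 + 1 + (mid.length : Int))) (g.toNat - 1)
                    g.toNat hgetlast hsetlast last hwl grid2 hlen2 ha2 (by rw [hb2]; simp [hw0]),
                    pv_row_neg g hg1 last hwl]
          obtain ⟨b, hb0, hblen, hlastf⟩ := hkey
          rw [← htsplit]
          simp only [PySem.List.enumerate, List.foldl_cons]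
          rw [PySem.List.enumerate_append]
          rw [hb0]
          rw [List.foldl_append]
          rw [show PySem.List.enumerate mid ((0 : Int) + 1)
              = PySem.List.enumerate mid (((1 : Nat) : Int)) from by norm_num]
          rw [pv_outer_gen g sx sy (placed_row g sx) mid
            (fun r hr => hstep r (hmemmid r hr)) 1 0 _
            (by omega)
            (by simp; omega)
            (by
              intro t ht h2
              have hne1 : g.toNat - 1 ≠ 0 + t := by omega
              rw [List.getElem_set_ne hne1]
              exact List.getElem_replicate ..)]
          have hdrop : ((List.replicate g.toNat (List.replicate g.toNat (0 : Int))).set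
              (g.toNat - 1) b).drop (0 + mid.length) = [b] := by
            rw [List.drop_set]
            rw [if_neg (by omega)]
            rw [List.drop_replicate]
            rw [show g.toNat - (0 + mid.length) = 1 from by omega,
                show g.toNat - 1 - (0 + mid.length) = 0 from by omega]
            rfl
          rw [hdrop]
          simp only [List.take_zero, List.nil_append]
          simp only [PySem.List.enumerate, List.foldl_cons, List.foldl_nil]
          rw [hlastf (mid.map (placed_row g sx) ++ [b])
            (by simp [hmidlen]; omega)
            (by simp [hmidlen])
            (by
              rw [List.getElem_append_right (by simp [hmidlen])]
              simp [hmidlen])]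
          rw [List.set_append]
          rw [if_neg (by simp [hmidlen])]
          rw [show g.toNat - 1 - (List.map (placed_row g sx) mid).length = 0
            from by simp [hmidlen]]
          rw [List.map_append]
          simp
        rw [hA]
        exact pv_assemble_tall g sy hsy1 p0 tail htlen (placed_row g sx)
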